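-- pv_equiv track=rewrite | github.com/siddhpant/google-foobar | level-2/lovely-lucky-lambs/sol.py | max_henchmen
-- ===== SOURCE A (Python) =====
-- def max_henchmen(total_lambs):
--     """Be stingy and pay maximum number of henchmen but as low as possible"""
--
--     # Rules state that:
--     # - No "more" than twice the LAMBs to seniors (i.e. less is valid).
--     # - Senior's LAMBs should not be less than that of his next two juniors.
--     # Fibonacci series satisfies both the constraints.
--
--     maximum = 1  # The juniorost henchmen
--     total_lambs -= 1  # Give him 1 LAMB
--     second_junior, immediate_junior = 0, 1
--
--     while total_lambs != 0:
--         senior = immediate_junior + second_junior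
--         if total_lambs >= senior:
--             total_lambs -= senior
--             maximum += 1
--             second_junior = immediate_junior
--             immediate_junior = senior
--         else:
--             break
--
--     return maximum
-- ===== SOURCE B (Python) =====
-- def max_henchmen(total_lambs):
--     """Be stingy and pay maximum number of henchmen but as low as possible"""
--     # Cumulative sum of the first k payments (Fibonacci) is F(k+2)-1, so the
--     # answer is the largest k >= 1 with F(k+2) <= total_lambs + 1.
--     target = total_lambs + 1
--     count = 1
--     a, b = 3, 5  # F(4), F(5): the thresholds for count = 2, 3, ...
--     while a <= target:
--         count += 1
--         a, b = b, a + b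
--     return count
-- ===== Notes on version B (the rewrite author's own statement) =====
-- stated objective: alternative
-- what changed: Replaces A's greedy subtraction of each Fibonacci payment from a shrinking remainder by the closed-form cumulative-sum identity sum F = F(k+2)-1: B compares successive Fibonacci thresholds against a fixed target total_lambs+1 and just counts, never mutating the remainder.
import Mathlib
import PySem

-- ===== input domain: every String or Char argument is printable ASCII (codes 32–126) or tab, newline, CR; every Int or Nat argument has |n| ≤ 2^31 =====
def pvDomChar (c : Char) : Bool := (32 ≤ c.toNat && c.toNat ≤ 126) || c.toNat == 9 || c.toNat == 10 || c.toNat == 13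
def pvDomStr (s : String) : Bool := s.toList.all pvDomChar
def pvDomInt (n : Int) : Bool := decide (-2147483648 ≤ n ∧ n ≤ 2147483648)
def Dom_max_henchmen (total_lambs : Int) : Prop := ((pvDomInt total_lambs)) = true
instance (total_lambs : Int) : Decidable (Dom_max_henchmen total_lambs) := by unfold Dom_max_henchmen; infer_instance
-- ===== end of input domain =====

-- B replaces A's greedy subtraction of Fibonacci payments from a shrinking remainder by
-- counting Fibonacci thresholds against the fixed target total_lambs+1 (objective: alternative).

-- ===== PORT A =====
-- A's while loop; the invariants 0 ≤ second_junior and 1 ≤ immediate_junior hold at every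
-- call reachable from max_henchmen and are carried as proof arguments for termination.
def maxHenchmenLoopA (total_lambs maximum second_junior immediate_junior : Int)
    (hs : 0 ≤ second_junior) (hi : 1 ≤ immediate_junior) : Int :=
  if total_lambs ≠ 0 then
    let senior := immediate_junior + second_junior
    if total_lambs ≥ senior then
      maxHenchmenLoopA (total_lambs - senior) (maximum + 1) immediate_junior senior
        (by omega) (by omega)
    else
      maximum
  else
    maximum
termination_by total_lambs.toNat
decreasing_by omega

def max_henchmen (total_lambs : Int) : Int :=
  maxHenchmenLoopA (total_lambs - 1) 1 0 1 (by norm_num) (by norm_num)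

-- ===== PORT B =====
-- B's while loop; 1 ≤ a and a < b hold at every call reachable from max_henchmen_alt
-- and are carried as proof arguments for termination.
def maxHenchmenLoopB (target count a b : Int) (ha : 1 ≤ a) (hab : a < b) : Int :=
  if a ≤ target then
    maxHenchmenLoopB target (count + 1) b (a + b) (by omega) (by omega)
  else
    count
termination_by (target + 1 - a).toNat
decreasing_by omega

def max_henchmen_alt (total_lambs : Int) : Int :=
  maxHenchmenLoopB (total_lambs + 1) 1 3 5 (by norm_num) (by norm_num)

-- ===== PRECONDITION & SPEC =====
def Spec_max_henchmen (total_lambs : Int) (out : Int) : Prop := out = max_henchmen_alt total_lambs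
instance (total_lambs : Int) (out : Int) : Decidable (Spec_max_henchmen total_lambs out) := by unfold Spec_max_henchmen; infer_instance

-- ===== CLAIM (what is proved, stated in full; the proofs are below) =====
def Claim_equal_max_henchmen : Prop := ∀ (total_lambs : Int), Dom_max_henchmen total_lambs → Spec_max_henchmen total_lambs (max_henchmen total_lambs)

-- ===== LEMMAS AND PROOFS =====

-- Alignment of the two loops: A's state (rem, m, s, i) corresponds to B's state with
-- fixed target rem + 2i + s and Fibonacci thresholds a = 3i + 2s, b = 5i + 3s.
lemma loopA_eq_loopB (n : Nat) :
    ∀ (rem m s i : Int) (hs : 0 ≤ s) (hi : 1 ≤ i), rem.toNat = n →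
    maxHenchmenLoopA rem m s i hs hi
      = maxHenchmenLoopB (rem + 2 * i + s) m (3 * i + 2 * s) (5 * i + 3 * s)
          (by omega) (by omega) := by
  induction n using Nat.strong_induction_on with
  | _ n ih =>
    intro rem m s i hs hi hn
    rw [maxHenchmenLoopA, maxHenchmenLoopB]
    by_cases hcont : rem ≥ i + s
    · -- both loops recurse
      have hne : rem ≠ 0 := by omega
      rw [if_pos (by omega), if_pos (by omega), if_pos (by omega)]
      have hrec := ih (rem - (i + s)).toNat (by omega) (rem - (i + s)) (m + 1) i (i + s)
        (by omega) (by omega) rfl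
      rw [hrec]
      congr 1 <;> ring
    · -- both loops exit, returning m
      by_cases hz : rem = 0
      · rw [if_neg (by omega), if_neg (by omega)]
      · rw [if_pos (by omega), if_neg (by omega), if_neg (by omega)]

-- ===== VERDICT (by name: the statement is the Claim_ definition above) =====
theorem max_henchmen_spec : Claim_equal_max_henchmen := by
  intro total_lambs _
  unfold Spec_max_henchmen max_henchmen max_henchmen_alt
  have h := loopA_eq_loopB (total_lambs - 1).toNat (total_lambs - 1) 1 0 1
    (by norm_num) (by norm_num) rfl
  rw [h]
  congr 1; ring
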